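-- pv_equiv track=rewrite | github.com/CarletonComputerScienceSociety/advent-of-code | 2021/day-12/EliasJRH/day12.py | exists_two
-- ===== SOURCE A (Python) =====
-- def exists_two(path):
--     occurs = {}
--     for place in path:
--         if place.islower():
--             if place not in occurs:
--                 occurs[place] = 0
--             occurs[place] += 1
--
--     for key in occurs:
--         if occurs[key] == 2:
--             return True
-- ===== SOURCE B (Python) =====
-- def exists_two(path):
--     lows = sorted([p for p in path if p.islower()])
--     while lows:
--         head = lows[0]
--         run = 1
--         while run < len(lows) and lows[run] == head:
--             run += 1
--         if run == 2:
--             return True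
--         lows = lows[run:]
-- ===== Notes on version B (the rewrite author's own statement) =====
-- stated objective: alternative
-- what changed: Replaces A's dict-of-counts plus second key scan with sort-then-single-pass run-length scanning of the lowercase elements, returning True on the first run of length exactly 2.
import Mathlib
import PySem

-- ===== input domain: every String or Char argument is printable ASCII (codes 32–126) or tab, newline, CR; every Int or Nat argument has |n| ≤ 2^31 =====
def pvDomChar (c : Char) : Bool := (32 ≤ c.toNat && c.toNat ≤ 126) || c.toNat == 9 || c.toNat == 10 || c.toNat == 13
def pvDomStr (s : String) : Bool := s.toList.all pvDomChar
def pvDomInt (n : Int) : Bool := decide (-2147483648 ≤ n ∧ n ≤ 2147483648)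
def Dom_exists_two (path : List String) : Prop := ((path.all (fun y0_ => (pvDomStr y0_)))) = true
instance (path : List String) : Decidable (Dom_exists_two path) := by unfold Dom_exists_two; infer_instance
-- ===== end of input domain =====

-- B replaces A's dict of counts + second key scan by sort-then-run-length scan of the
-- lowercase elements (alternative decomposition, not claimed faster).

-- ===== PORT A =====
-- hand port of Python str.islower(): at least one cased character and no uppercase one;
-- exact on the ASCII domain (cased = letters there)
def pvStrIslower (s : String) : Bool :=
  s.toList.any (fun c => PySem.Chars.isalpha c) && s.toList.all (fun c => !PySem.Chars.isupper c)

-- A's second loop: 'for key in occurs: if occurs[key] == 2: return True' (falls through to None)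
def existsTwoScan (occurs : PySem.Dict String Int) : List String → Option Bool
  | [] => none
  | k :: ks => if occurs.getD k 0 = 2 then some true else existsTwoScan occurs ks

def exists_two (path : List String) : Option Bool :=
  let occurs := path.foldl (fun d place =>
    if pvStrIslower place then
      (if d.contains place then d else d.insert place (0 : Int)).modify place 0 (· + 1)
    else d) PySem.Dict.empty
  existsTwoScan occurs occurs.keys

-- ===== PORT B =====
-- Source B's outer while loop: measure the run of the head element, succeed on a run of
-- exactly 2, else drop the run and continue
def runScan : List String → Option Bool
  | [] => none
  | head :: rest =>
    let run := 1 + (rest.takeWhile (fun p => p == head)).length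
    if run = 2 then some true else runScan (rest.drop (run - 1))
termination_by ys => ys.length
decreasing_by simp

def exists_two_alt (path : List String) : Option Bool :=
  runScan (PySem.List.sorted (path.filter (fun p => pvStrIslower p)) (fun x => x) false)

-- ===== PRECONDITION & SPEC =====
def Spec_exists_two (path : List String) (out : Option Bool) : Prop := out = exists_two_alt path
instance (path : List String) (out : Option Bool) : Decidable (Spec_exists_two path out) := by unfold Spec_exists_two; infer_instance

-- ===== CLAIM (what is proved, stated in full; the proofs are below) =====
def Claim_equal_exists_two : Prop := ∀ (path : List String), Dom_exists_two path → Spec_exists_two path (exists_two path)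

-- ===== LEMMAS AND PROOFS =====

-- a guarded foldl is a foldl over the filtered list
theorem foldl_if_filter {α β : Type} (c : β → Bool) (f : α → β → α) (l : List β) (a : α) :
    l.foldl (fun d x => if c x then f d x else d) a = (l.filter c).foldl f a := by
  induction l generalizing a with
  | nil => rfl
  | cons x xs ih =>
    simp only [List.foldl_cons, List.filter_cons]
    by_cases h : c x = true <;> simp [h, ih]

-- A's 'setdefault 0 then += 1' step is the counter step
theorem stepA_eq (d : PySem.Dict String Int) (p : String) :
    (if d.contains p then d else d.insert p (0 : Int)).modify p 0 (· + 1) = d.modify p 0 (· + 1) := by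
  cases h : d.contains p with
  | true => simp
  | false =>
    simp only [Bool.false_eq_true, if_false, PySem.Dict.modify, PySem.Dict.getD_insert_self,
      PySem.Dict.getD_of_not_contains (h := h), PySem.Dict.insert_insert_self]

theorem foldl_stepA_eq_counter (l : List String) :
    l.foldl (fun d p => (if d.contains p then d else d.insert p (0 : Int)).modify p 0 (· + 1))
      PySem.Dict.empty = PySem.Dict.counter l := by
  rw [PySem.Dict.counter_eq_foldl]
  congr 1
  funext d p
  exact stepA_eq d p

theorem scan_spec (d : PySem.Dict String Int) (ks : List String) :
    existsTwoScan d ks = if ks.any (fun k => d.getD k 0 == 2) then some true else none := by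
  induction ks with
  | nil => rfl
  | cons k ks ih =>
    simp only [existsTwoScan, List.any_cons, ih]
    by_cases h : d.getD k 0 = 2 <;> simp [h]

theorem exists_two_eq (path : List String) :
    exists_two path =
      if (path.filter (fun p => pvStrIslower p)).any
          (fun x => (path.filter (fun p => pvStrIslower p)).count x == 2) then some true else none := by
  have h1 : exists_two path =
      existsTwoScan (PySem.Dict.counter (path.filter (fun p => pvStrIslower p)))
        (PySem.Dict.counter (path.filter (fun p => pvStrIslower p))).keys := by
    unfold exists_two
    rw [foldl_if_filter, foldl_stepA_eq_counter]
  set lows := path.filter (fun p => pvStrIslower p) with hl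
  rw [h1, scan_spec, PySem.Dict.keys_counter]
  have hc : (PySem.Set.ofList lows).any (fun k => (PySem.Dict.counter lows).getD k 0 == 2)
      = lows.any (fun x => lows.count x == 2) := by
    apply Bool.eq_iff_iff.mpr
    simp only [List.any_eq_true]
    constructor
    · rintro ⟨x, hx, h2⟩
      refine ⟨x, (PySem.Set.mem_ofList lows x).mp hx, ?_⟩
      simp only [PySem.Dict.getD_counter, beq_iff_eq] at h2 ⊢
      exact_mod_cast h2
    · rintro ⟨x, hx, h2⟩
      refine ⟨x, (PySem.Set.mem_ofList lows x).mpr hx, ?_⟩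
      simp only [PySem.Dict.getD_counter, beq_iff_eq] at h2 ⊢
      exact_mod_cast h2
  rw [hc]

-- in a sorted list, everything the head's run leaves behind is strictly greater
theorem dropWhile_gt (h : String) : ∀ (rest : List String),
    (∀ x ∈ rest, h ≤ x) → rest.Pairwise (· ≤ ·) →
    ∀ x ∈ rest.dropWhile (fun p => p == h), h < x := by
  intro rest
  induction rest with
  | nil => intro _ _ x hx; simp [List.dropWhile] at hx
  | cons r rs ih =>
    intro hle hp x hx
    rw [List.dropWhile_cons] at hx
    by_cases hr : r = h
    · simp only [hr, beq_self_eq_true, if_true] at hx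
      exact ih (fun y hy => hle y (List.mem_cons_of_mem _ hy)) (List.Pairwise.of_cons hp) x hx
    · simp only [beq_iff_eq, hr, if_false] at hx
      have hhr : h < r := lt_of_le_of_ne (hle r List.mem_cons_self) (Ne.symm hr)
      rcases List.mem_cons.mp hx with rfl | hxs
      · exact hhr
      · exact lt_of_lt_of_le hhr ((List.pairwise_cons.mp hp).1 x hxs)

theorem runScan_sorted_spec : ∀ (n : Nat) (ys : List String), ys.length ≤ n → ys.Pairwise (· ≤ ·) →
    runScan ys = if ys.any (fun x => ys.count x == 2) then some true else none := by
  intro n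
  induction n with
  | zero =>
    intro ys hlen _
    have : ys = [] := List.eq_nil_of_length_eq_zero (Nat.le_zero.mp hlen)
    subst this; simp [runScan]
  | succ n ih =>
    intro ys hlen hs
    match ys with
    | [] => simp [runScan]
    | h :: rest =>
      have hle : ∀ x ∈ rest, h ≤ x := (List.pairwise_cons.mp hs).1
      have hprest : rest.Pairwise (· ≤ ·) := (List.pairwise_cons.mp hs).2
      set t := rest.takeWhile (fun p => p == h) with ht
      set dd := rest.dropWhile (fun p => p == h) with hdd
      have htd : t ++ dd = rest := List.takeWhile_append_dropWhile
      have hmem_t : ∀ x ∈ t, x = h := by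
        intro x hx
        have h3 := List.mem_takeWhile_imp hx
        exact beq_iff_eq.mp h3
      have hcount_t : t.count h = t.length :=
        List.count_eq_length.mpr (fun b hb => (hmem_t b hb).symm)
      have hgt : ∀ x ∈ dd, h < x := dropWhile_gt h rest hle hprest
      have hcount_dd : dd.count h = 0 :=
        List.count_eq_zero.mpr (fun hmem => lt_irrefl h (hgt h hmem))
      have hcount_h : (h :: rest).count h = 1 + t.length := by
        rw [← htd, List.count_cons_self, List.count_append, hcount_t, hcount_dd]
        omega
      rw [runScan]
      simp only [← ht]
      by_cases hrun : 1 + t.length = 2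
      · rw [if_pos hrun]
        have : (h :: rest).any (fun x => (h :: rest).count x == 2) = true := by
          refine List.any_eq_true.mpr ⟨h, List.mem_cons_self, ?_⟩
          simp [hcount_h, hrun]
        rw [this, if_pos rfl]
      · rw [if_neg hrun]
        have hdrop : rest.drop (1 + t.length - 1) = dd := by
          have : 1 + t.length - 1 = t.length := by omega
          rw [this, ← htd, List.drop_left]
        have hddlen : dd.length ≤ n := by
          have h1 : t.length + dd.length = rest.length := by
            rw [← htd] at *; simp
          simp only [List.length_cons] at hlen
          omega
        have hddp : dd.Pairwise (· ≤ ·) := hprest.sublist (List.dropWhile_sublist _)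
        rw [hdrop, ih dd hddlen hddp]
        have hcond : (h :: rest).any (fun x => (h :: rest).count x == 2)
            = dd.any (fun x => dd.count x == 2) := by
          apply Bool.eq_iff_iff.mpr
          simp only [List.any_eq_true, beq_iff_eq]
          constructor
          · rintro ⟨x, hx, h2⟩
            have hxh : x ≠ h := by
              rintro rfl
              rw [hcount_h] at h2
              exact hrun h2
            have hxrest : x ∈ rest := by
              rcases List.mem_cons.mp hx with rfl | hr
              · exact absurd rfl hxh
              · exact hr
            have hxdd : x ∈ dd := by
              rw [← htd] at hxrest
              rcases List.mem_append.mp hxrest with hT | hD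
              · exact absurd (hmem_t x hT) hxh
              · exact hD
            refine ⟨x, hxdd, ?_⟩
            have hct : t.count x = 0 :=
              List.count_eq_zero.mpr (fun hmem => hxh (hmem_t x hmem))
            rw [← htd, List.count_cons_of_ne (Ne.symm hxh), List.count_append, hct] at h2
            omega
          · rintro ⟨x, hx, h2⟩
            have hxh : x ≠ h := fun he => lt_irrefl h (he ▸ hgt x hx)
            have hct : t.count x = 0 :=
              List.count_eq_zero.mpr (fun hmem => hxh (hmem_t x hmem))
            refine ⟨x, List.mem_cons_of_mem _ (htd ▸ List.mem_append_right t hx), ?_⟩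
            rw [← htd, List.count_cons_of_ne (Ne.symm hxh), List.count_append, hct]
            omega
        rw [hcond]

theorem exists_two_spec : Claim_equal_exists_two := by
  intro path _
  unfold Spec_exists_two exists_two_alt
  rw [exists_two_eq]
  set lows := path.filter (fun p => pvStrIslower p) with hl
  set srt := PySem.List.sorted lows (fun x => x) false with hsrt
  have hperm : srt.Perm lows := PySem.List.sorted_perm lows (fun x => x) false
  have hp : srt.Pairwise (· ≤ ·) := by
    have := PySem.List.sorted_pairwise lows (fun x => x)
    simpa using this
  rw [runScan_sorted_spec srt.length srt le_rfl hp]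
  have hcond : srt.any (fun x => srt.count x == 2) = lows.any (fun x => lows.count x == 2) := by
    apply Bool.eq_iff_iff.mpr
    simp only [List.any_eq_true]
    constructor
    · rintro ⟨x, hx, h2⟩
      exact ⟨x, hperm.mem_iff.mp hx, by rwa [hperm.count_eq] at h2⟩
    · rintro ⟨x, hx, h2⟩
      exact ⟨x, hperm.mem_iff.mpr hx, by rwa [hperm.count_eq]⟩
  rw [hcond]
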